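-- pv_equiv track=rewrite | github.com/ankush-poonia007/DSA-60-Day-Challenge | Day-31/solution.py | countBSTs
-- ===== SOURCE A (Python) =====
-- def countBSTs(arr):
--     # Code here
--
--
--     # 2. Sort a copy of arr
--     # 3. For each element in original arr:
--     #      - left_count  = elements smaller in sorted copy
--     #      - right_count = elements larger in sorted copy
--     #      - result[i]   = f[left_count] × f[right_count]
--     # 4. Return result
--
--     n = len(arr)
--
--     # counts stores the number of unique BSTs for 'i' nodes
--     catalan_counts=[0]*6
--
--     catalan_counts[0] , catalan_counts[1] = 1,1
--
--
--     # Precompute Catalan numbers up to 6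
--     for i in range ( 2 , 6):
--
--         for j in range ( 0 , i):
--             catalan_counts[i] += catalan_counts[j] * catalan_counts[i-j-1]
--
--
--     stored_elements = sorted(arr)
--
--     result = []
--     for num in arr:
--
--         # Nodes smaller than current become the left subtree
--         left_count = stored_elements.index(num)
--         # Nodes larger than current become the right subtree
--         right_count = n - left_count - 1
--
--         # Total BSTs = (Ways to form left) * (Ways to form right)
--         result.append( catalan_counts[left_count] * catalan_counts[right_count] )
--
--     return result
-- ===== SOURCE B (Python) =====
-- def countBSTs(arr):
--     # The function only ever indexes Catalan numbers 0..5, so keep them as a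
--     # fixed literal table; rank each element by counting strictly smaller ones
--     # directly in arr instead of sorting and using .index.
--     catalan = [1, 1, 2, 5, 14, 42]
--     n = len(arr)
--     result = []
--     for num in arr:
--         left = sum(1 for x in arr if x < num)
--         result.append(catalan[left] * catalan[n - left - 1])
--     return result
-- ===== Notes on version B (the rewrite author's own statement) =====
-- stated objective: simpler
-- what changed: B drops the Catalan DP loop in favour of a six-entry literal Catalan table and drops the sort + .index rank lookup, instead counting the strictly smaller elements of the original array for each element.
import Mathlib
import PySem

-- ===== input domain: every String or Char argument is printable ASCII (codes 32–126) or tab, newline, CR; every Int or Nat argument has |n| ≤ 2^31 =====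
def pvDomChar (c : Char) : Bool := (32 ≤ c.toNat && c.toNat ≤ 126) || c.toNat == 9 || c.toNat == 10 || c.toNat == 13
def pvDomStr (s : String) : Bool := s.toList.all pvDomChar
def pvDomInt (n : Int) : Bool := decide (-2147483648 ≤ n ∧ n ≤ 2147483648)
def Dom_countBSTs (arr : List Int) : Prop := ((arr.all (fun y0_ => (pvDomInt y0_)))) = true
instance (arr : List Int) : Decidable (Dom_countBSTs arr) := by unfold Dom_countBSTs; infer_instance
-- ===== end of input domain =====

-- B replaces A's Catalan DP + sort + .index rank lookup by a literal Catalan table and a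
-- direct count of strictly smaller elements (objective: simpler; same behaviour on Pre_).

-- ===== PORT A =====
-- A's Catalan precompute: [0]*6, set indices 0 and 1 to 1, then the nested range loops.
-- (a closed computation with no free variables, hoisted as a helper; loop indices from
-- pyRange 2 6 / pyRange 0 i are nonnegative, so pySetD/pyGetD are exact here)
def pvCatalanA : List Int :=
  (PySem.List.pyRange 2 6 1).foldl (fun c i =>
    (PySem.List.pyRange 0 i 1).foldl (fun c j =>
      PySem.List.pySetD c i
        (PySem.List.pyGetD c i 0 + PySem.List.pyGetD c j 0 * PySem.List.pyGetD c (i - j - 1) 0)) c)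
    (((List.replicate 6 (0 : Int)).set 0 1).set 1 1)

def countBSTs (arr : List Int) : List Int :=
  let n : Int := arr.length
  let stored := PySem.List.sorted arr id false
  arr.foldl (fun result num =>
    -- stored_elements.index(num): num is always a member, so the getD default is never used
    let left : Int := ((PySem.List.index? stored num).getD 0 : Nat)
    let right : Int := n - left - 1
    result ++ [PySem.List.pyGetD pvCatalanA left 0 * PySem.List.pyGetD pvCatalanA right 0]) []

-- ===== PORT B =====
def countBSTs_alt (arr : List Int) : List Int :=
  let catalan : List Int := [1, 1, 2, 5, 14, 42]
  let n : Int := arr.length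
  arr.map (fun num =>
    let left : Int := (arr.countP (fun x => decide (x < num)) : Nat)
    PySem.List.pyGetD catalan left 0 * PySem.List.pyGetD catalan (n - left - 1) 0)

-- ===== PRECONDITION & SPEC =====
-- Pre_ excludes lists of length ≥ 7, on which A raises IndexError (catalan_counts has only 6 entries).
def Pre_countBSTs (arr : List Int) : Prop := arr.length ≤ 6
instance (arr : List Int) : Decidable (Pre_countBSTs arr) := by unfold Pre_countBSTs; infer_instance
def pvWitness_countBSTs : List Int := [3, 1, 2]

def Spec_countBSTs (arr : List Int) (out : List Int) : Prop := out = countBSTs_alt arr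
instance (arr : List Int) (out : List Int) : Decidable (Spec_countBSTs arr out) := by unfold Spec_countBSTs; infer_instance

-- ===== CLAIM (what is proved, stated in full; the proofs are below) =====
def Claim_equal_countBSTs : Prop := ∀ (arr : List Int), Dom_countBSTs arr → Pre_countBSTs arr → Spec_countBSTs arr (countBSTs arr)

-- ===== LEMMAS AND PROOFS =====

-- A's DP table evaluates to the six-entry literal Catalan table B uses.
lemma pvCatalanA_eq : pvCatalanA = [1, 1, 2, 5, 14, 42] := by decide

-- In a ≤-sorted list, the first index of a member v is the number of elements < v.
lemma index?_sorted_eq_countP (s : List Int) (hp : s.Pairwise (· ≤ ·)) (v : Int) (hv : v ∈ s) :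
    PySem.List.index? s v = some (s.countP (fun x => decide (x < v))) := by
  induction s with
  | nil => cases hv
  | cons x t ih =>
    rcases List.pairwise_cons.mp hp with ⟨hx, ht⟩
    by_cases hxv : x = v
    · subst hxv
      have h0 : t.countP (fun y => decide (y < x)) = 0 :=
        List.countP_eq_zero.mpr (fun y hy => by simpa using not_lt.mpr (hx y hy))
      rw [PySem.List.index?_cons_self]
      simp [h0]
    · have hvt : v ∈ t := by
        rcases List.mem_cons.mp hv with h | h
        · exact absurd h.symm hxv
        · exact h
      have hxlt : x < v := lt_of_le_of_ne (hx v hvt) hxv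
      rw [PySem.List.index?_cons_of_ne t hxv, ih ht hvt]
      simp [hxlt]

-- A's rank lookup agrees with B's direct count, for every member of arr.
lemma rank_eq (arr : List Int) (v : Int) (hv : v ∈ arr) :
    (PySem.List.index? (PySem.List.sorted arr id false) v).getD 0
      = arr.countP (fun x => decide (x < v)) := by
  have hperm := PySem.List.sorted_perm (xs := arr) (key := id) (rev := false)
  have hmem : v ∈ PySem.List.sorted arr id false := (PySem.List.mem_sorted _ _ _ _).mpr hv
  rw [index?_sorted_eq_countP _ (by simpa using PySem.List.sorted_pairwise (xs := arr) (key := id)) v hmem]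
  simp [hperm.countP_eq]

-- ===== VERDICT (by name: the statement is the Claim_ definition above) =====
theorem countBSTs_spec : Claim_equal_countBSTs := by
  intro arr _ _
  unfold Spec_countBSTs countBSTs countBSTs_alt
  rw [PySem.List.foldl_append_singleton_eq_map, pvCatalanA_eq]
  exact List.map_congr_left (fun v hv => by rw [rank_eq arr v hv])
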